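-- pv_equiv track=rewrite | github.com/0xPuddi/Algorithms | src/algorithms/better_algo_298.py | better_x
-- ===== SOURCE A (Python) =====
-- def better_x(A):
--     x = 0
--
--     for i in range(1, len(A)):
--         if A[i - 1] != A[i]:
--             x += 1
--
--     if x >= 3:
--         return True
--
--     return False
-- ===== SOURCE B (Python) =====
-- def better_x(A):
--     # Strip the first run of equal elements three times; a 4th run remains
--     # exactly when the sequence has at least 3 adjacent changes.
--     def tail_after_first_run(xs):
--         j = 0
--         while j + 1 < len(xs) and xs[j + 1] == xs[j]:
--             j += 1
--         return xs[j + 1:]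
--     rest = tail_after_first_run(tail_after_first_run(tail_after_first_run(A)))
--     return len(rest) > 0
-- ===== Notes on version B (the rewrite author's own statement) =====
-- stated objective: alternative
-- what changed: B does not count transitions at all: it strips the leading maximal run of equal elements three times (stopping early) and returns whether anything is left, i.e. whether a fourth run exists, instead of A's full index-pair counting loop.
import Mathlib
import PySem

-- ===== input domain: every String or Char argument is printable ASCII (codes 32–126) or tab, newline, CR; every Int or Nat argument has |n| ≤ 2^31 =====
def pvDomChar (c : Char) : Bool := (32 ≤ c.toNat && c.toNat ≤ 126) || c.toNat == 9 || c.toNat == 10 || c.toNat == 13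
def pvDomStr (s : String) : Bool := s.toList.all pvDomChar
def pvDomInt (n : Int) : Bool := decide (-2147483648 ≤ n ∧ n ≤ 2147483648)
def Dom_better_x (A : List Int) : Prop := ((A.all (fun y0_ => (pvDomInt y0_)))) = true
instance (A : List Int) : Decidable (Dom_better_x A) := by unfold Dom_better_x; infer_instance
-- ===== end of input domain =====

-- B strips the leading run of equal elements three times (early exit) and tests
-- whether a fourth run remains, instead of A's counting loop; alternative, same cost.

-- ===== PORT A =====
def better_x (A : List Int) : Bool :=
  let x : Int := (PySem.List.pyRange 1 (A.length : Int) 1).foldl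
    (fun x i =>
      if PySem.List.pyGetD A (i - 1) 0 ≠ PySem.List.pyGetD A i 0 then x + 1 else x) 0
  if x ≥ 3 then true else false

-- ===== PORT B =====
-- the 'while j + 1 < len(xs) and xs[j+1] == xs[j]: j += 1' loop, then 'return xs[j+1:]'
def tafrAux (xs : List Int) (j : Int) : List Int :=
  if h : j + 1 < (xs.length : Int) ∧ PySem.List.pyGetD xs (j + 1) 0 = PySem.List.pyGetD xs j 0
  then tafrAux xs (j + 1)
  else PySem.List.slice xs (some (j + 1)) none
termination_by ((xs.length : Int) - j).toNat
decreasing_by omega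

def tailAfterFirstRun (xs : List Int) : List Int := tafrAux xs 0

def better_x_alt (A : List Int) : Bool :=
  let rest := tailAfterFirstRun (tailAfterFirstRun (tailAfterFirstRun A))
  decide (0 < rest.length)

-- ===== PRECONDITION & SPEC =====
def Spec_better_x (A : List Int) (out : Bool) : Prop := out = better_x_alt A
instance (A : List Int) (out : Bool) : Decidable (Spec_better_x A out) := by unfold Spec_better_x; infer_instance

-- ===== CLAIM (what is proved, stated in full; the proofs are below) =====
def Claim_equal_better_x : Prop := ∀ (A : List Int), Dom_better_x A → Spec_better_x A (better_x A)

-- ===== LEMMAS AND PROOFS =====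

-- number of maximal runs of equal elements
def groupCount : List Int → Int
  | [] => 0
  | [_] => 1
  | x :: y :: t => (if x = y then 0 else 1) + groupCount (y :: t)

-- transitions seen by A's loop, starting from a previous element
def transCount : Int → List Int → Int
  | _, [] => 0
  | p, y :: t => (if p = y then 0 else 1) + transCount y t

-- structural counterpart of tafrAux
def tailRec : List Int → List Int
  | [] => []
  | [_] => []
  | x :: y :: t => if y = x then tailRec (y :: t) else y :: t

theorem groupCount_cons (x : Int) (xs : List Int) :
    groupCount (x :: xs) = 1 + transCount x xs := by
  induction xs generalizing x with
  | nil => simp [groupCount, transCount]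
  | cons y t ih =>
    simp only [groupCount, transCount, ih y]
    ring

theorem transCount_nonneg (p : Int) (xs : List Int) : 0 ≤ transCount p xs := by
  induction xs generalizing p with
  | nil => simp [transCount]
  | cons y t ih =>
    simp only [transCount]
    have := ih y
    split_ifs <;> omega

theorem foldA_eq_trans (xs : List Int) (pre : List Int) (prev : Int) (acc : Int) :
    (PySem.List.pyRange ((pre.length : Int) + 1) (((pre ++ prev :: xs).length : Int)) 1).foldl
      (fun x i =>
        if PySem.List.pyGetD (pre ++ prev :: xs) (i - 1) 0 ≠ PySem.List.pyGetD (pre ++ prev :: xs) i 0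
        then x + 1 else x) acc
    = acc + transCount prev xs := by
  induction xs generalizing pre prev acc with
  | nil =>
    rw [PySem.List.pyRange_one_eq_nil (by simp)]
    simp [transCount]
  | cons y t ih =>
    have hlen : ((pre ++ prev :: y :: t).length : Int) = (pre.length : Int) + 2 + t.length := by
      simp; omega
    rw [PySem.List.pyRange_one_cons (by rw [hlen]; omega)]
    simp only [List.foldl_cons]
    have hprev : PySem.List.pyGetD (pre ++ prev :: y :: t) ((pre.length : Int) + 1 - 1) 0 = prev := by
      rw [PySem.List.pyGetD_eq_getElem _ _ (by omega) (by rw [hlen]; omega)]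
      simp
    have hy : PySem.List.pyGetD (pre ++ prev :: y :: t) ((pre.length : Int) + 1) 0 = y := by
      rw [PySem.List.pyGetD_eq_getElem _ _ (by omega) (by rw [hlen]; omega)]
      have ht : ((pre.length : Int) + 1).toNat = pre.length + 1 := by omega
      simp only [ht]
      rw [List.getElem_append_right (by omega)]
      simp
    rw [hprev, hy]
    have hsplit : pre ++ prev :: y :: t = (pre ++ [prev]) ++ y :: t := by simp
    have hlen2 : (pre.length : Int) + 1 + 1 = (((pre ++ [prev]).length : Int)) + 1 := by simp
    rw [hsplit, hlen2, ih (pre ++ [prev]) y _]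
    simp only [transCount]
    rcases eq_or_ne prev y with h | h
    · rw [if_neg (not_not_intro h), if_pos h]; ring
    · rw [if_pos h, if_neg h]; ring

theorem loop_eq (A : List Int) :
    (PySem.List.pyRange 1 (A.length : Int) 1).foldl
      (fun x i =>
        if PySem.List.pyGetD A (i - 1) 0 ≠ PySem.List.pyGetD A i 0 then x + 1 else x) 0
    = groupCount A - (if A = [] then 0 else 1) := by
  cases A with
  | nil => simp [PySem.List.pyRange_one_eq_nil, groupCount]
  | cons x xs =>
    have h := foldA_eq_trans xs [] x 0
    simp only [List.nil_append, List.length_nil, Nat.cast_zero, zero_add] at h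
    rw [if_neg (List.cons_ne_nil x xs), groupCount_cons]
    exact h.trans (by ring)

-- B side: tafrAux computes tailRec of the dropped suffix
theorem tafrAux_eq (s : List Int) : ∀ (xs : List Int) (j : Int), 0 ≤ j →
    xs.drop j.toNat = s → tafrAux xs j = tailRec s := by
  induction s with
  | nil =>
    intro xs j hj hd
    have hge : xs.length ≤ j.toNat := List.drop_eq_nil_iff.mp hd
    rw [tafrAux, dif_neg (by intro h; omega)]
    rw [PySem.List.slice_from _ (by omega)]
    rw [List.drop_eq_nil_iff.mpr (by omega)]
    rfl
  | cons x t ih =>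
    intro xs j hj hd
    have hlt : j.toNat < xs.length := by
      by_contra hge
      rw [List.drop_eq_nil_iff.mpr (by omega)] at hd
      exact absurd hd.symm (List.cons_ne_nil _ _)
    have hcons := List.drop_eq_getElem_cons (l := xs) (i := j.toNat) hlt
    rw [hd] at hcons
    injection hcons with hx htail
    have hgj : PySem.List.pyGetD xs j 0 = x := by
      rw [PySem.List.pyGetD_eq_getElem _ _ hj (by omega)]; exact hx.symm
    cases t with
    | nil =>
      have hlen : xs.length = j.toNat + 1 := by
        have := List.drop_eq_nil_iff.mp htail.symm
        omega
      rw [tafrAux, dif_neg (by intro h; omega)]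
      rw [PySem.List.slice_from _ (by omega)]
      have : (j + 1).toNat = j.toNat + 1 := by omega
      rw [this, ← htail]
      rfl
    | cons y t' =>
      have hlt2 : j.toNat + 1 < xs.length := by
        by_contra hge
        rw [List.drop_eq_nil_iff.mpr (by omega)] at htail
        exact absurd htail (List.cons_ne_nil _ _)
      have hcons2 := List.drop_eq_getElem_cons (l := xs) (i := j.toNat + 1) hlt2
      rw [← htail] at hcons2
      injection hcons2 with hy _
      have hgj1 : PySem.List.pyGetD xs (j + 1) 0 = y := by
        rw [PySem.List.pyGetD_eq_getElem _ _ (by omega) (by omega)]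
        simp only [show (j + 1).toNat = j.toNat + 1 from by omega]
        exact hy.symm
      rcases eq_or_ne y x with heq | hne
      · rw [tafrAux, dif_pos ⟨by omega, by rw [hgj1, hgj, heq]⟩]
        rw [ih xs (j + 1) (by omega) (by rw [show (j+1).toNat = j.toNat + 1 by omega]; exact htail.symm)]
        simp [tailRec, heq]
      · rw [tafrAux, dif_neg (by intro h; exact hne (by rw [hgj1, hgj] at h; exact h.2))]
        rw [PySem.List.slice_from _ (by omega)]
        rw [show (j+1).toNat = j.toNat + 1 by omega, ← htail]
        simp [tailRec, hne]

theorem tailAfterFirstRun_eq (xs : List Int) : tailAfterFirstRun xs = tailRec xs := by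
  unfold tailAfterFirstRun
  exact tafrAux_eq xs xs 0 le_rfl (by simp)

theorem groupCount_step (xs : List Int) (h : xs ≠ []) :
    groupCount xs = 1 + groupCount (tailRec xs) := by
  induction xs with
  | nil => exact absurd rfl h
  | cons x t ih =>
    cases t with
    | nil => simp [groupCount, tailRec]
    | cons y t' =>
      simp only [groupCount, tailRec]
      rcases eq_or_ne y x with heq | hne
      · rw [if_pos heq.symm, if_pos heq, ih (List.cons_ne_nil y t')]
        ring
      · rw [if_neg (fun hh => hne hh.symm), if_neg hne]

theorem groupCount_pos_iff (xs : List Int) : 1 ≤ groupCount xs ↔ xs ≠ [] := by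
  constructor
  · intro h hnil; subst hnil; simp [groupCount] at h
  · intro h
    cases xs with
    | nil => exact absurd rfl h
    | cons x t =>
      rw [groupCount_cons]
      have := transCount_nonneg x t
      omega

theorem run_iff (k : Nat) : ∀ xs : List Int, (tailRec^[k] xs ≠ []) ↔ ((k : Int) + 1 ≤ groupCount xs) := by
  induction k with
  | zero =>
    intro xs
    simpa using (groupCount_pos_iff xs).symm
  | succ k ih =>
    intro xs
    rw [Function.iterate_succ_apply]
    rcases eq_or_ne xs [] with rfl | hne
    · have h0 : tailRec ([] : List Int) = [] := rfl
      rw [h0, ih]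
      simp [groupCount]
      omega
    · rw [ih (tailRec xs)]
      have := groupCount_step xs hne
      push_cast
      omega

-- ===== VERDICT (by name: the statement is the Claim_ definition above) =====
theorem better_x_spec : Claim_equal_better_x := by
  intro A _
  unfold Spec_better_x better_x better_x_alt
  rw [loop_eq]
  simp only [tailAfterFirstRun_eq]
  have h3 : tailRec (tailRec (tailRec A)) = tailRec^[3] A := by
    simp [Function.iterate_succ_apply']
  rw [h3]
  have hiff := run_iff 3 A
  have hlen : 0 < (tailRec^[3] A).length ↔ tailRec^[3] A ≠ [] := by
    rw [List.length_pos_iff_ne_nil]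
  rcases eq_or_ne A [] with rfl | hne
  · have : tailRec^[3] ([] : List Int) = [] := by
      simp [Function.iterate_succ_apply', tailRec]
    simp [this, groupCount]
  · rw [if_neg hne]
    have hk : ((3 : Nat) : Int) + 1 = 4 := by norm_num
    rw [hk] at hiff
    by_cases h : (4 : Int) ≤ groupCount A
    · rw [if_pos (by omega), Eq.comm, decide_eq_true_iff, hlen, hiff]; exact h
    · rw [if_neg (by omega), Eq.comm, decide_eq_false_iff_not, hlen, hiff]; exact h
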